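-- pv_equiv track=rewrite | github.com/queelius/computational-explorations | src/adversarial_misc.py | has_schur_triple
-- ===== SOURCE A (Python) =====
-- from typing import Dict, List, Optional, Set, Tuple, Any
--
-- def has_schur_triple(s: Set[int]) -> bool:
--     """Check if set s contains a Schur triple a + b = c (integers, a <= b)."""
--     s_list = sorted(s)
--     s_set = s
--     for i, a in enumerate(s_list):
--         for b in s_list[i:]:
--             if a + b in s_set:
--                 return True
--     return False
-- ===== SOURCE B (Python) =====
-- def has_schur_triple(s):
--     """Check if set s contains a Schur triple a + b = c (integers):
--     sort once, then for each target c run the classic two-pointer scan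
--     over the sorted list (no membership tests on sums)."""
--     xs = sorted(s)
--     n = len(xs)
--     for c in xs:
--         lo, hi = 0, n - 1
--         while lo <= hi:
--             t = xs[lo] + xs[hi]
--             if t == c:
--                 return True
--             if t < c:
--                 lo += 1
--             else:
--                 hi -= 1
--     return False
-- ===== Notes on version B (the rewrite author's own statement) =====
-- stated objective: alternative
-- what changed: Replaces A's triangular pair scan with set-membership tests on every sum by a sort plus, for each target c, a converging two-pointer sweep over the sorted list that never tests membership of a sum.
import Mathlib
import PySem

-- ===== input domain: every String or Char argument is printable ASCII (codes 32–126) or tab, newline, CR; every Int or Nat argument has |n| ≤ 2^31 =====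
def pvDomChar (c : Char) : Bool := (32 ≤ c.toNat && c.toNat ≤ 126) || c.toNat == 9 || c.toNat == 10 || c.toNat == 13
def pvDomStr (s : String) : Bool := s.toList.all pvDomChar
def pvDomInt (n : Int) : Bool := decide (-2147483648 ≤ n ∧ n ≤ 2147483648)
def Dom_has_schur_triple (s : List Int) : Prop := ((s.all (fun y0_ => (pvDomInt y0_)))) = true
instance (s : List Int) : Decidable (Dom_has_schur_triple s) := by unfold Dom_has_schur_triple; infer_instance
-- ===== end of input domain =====

-- B replaces A's triangular pair scan with set-membership tests on sums by sort + a
-- converging two-pointer sweep per target value (objective: alternative algorithm).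

-- ===== PORT A =====
def has_schur_triple (s : List Int) : Bool :=
  let sList := PySem.List.sorted s (fun x => x) false
  let sSet := s
  (PySem.List.enumerate sList 0).any (fun p =>
    (PySem.List.slice sList (some p.1) none).any (fun b =>
      PySem.Set.contains sSet (p.2 + b)))

-- ===== PORT B =====
/-- The `while lo <= hi` two-pointer loop of Source B, as recursion on the window width. -/
def twoPtr (xs : List Int) (c : Int) (lo hi : Int) : Bool :=
  if _h : lo ≤ hi then
    let t := PySem.List.pyGetD xs lo 0 + PySem.List.pyGetD xs hi 0
    if t = c then true
    else if t < c then twoPtr xs c (lo + 1) hi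
    else twoPtr xs c lo (hi - 1)
  else false
termination_by (hi + 1 - lo).toNat
decreasing_by all_goals omega

def has_schur_triple_alt (s : List Int) : Bool :=
  let xs := PySem.List.sorted s (fun x => x) false
  xs.any (fun c => twoPtr xs c 0 ((xs.length : Int) - 1))

-- ===== PRECONDITION & SPEC =====
def Spec_has_schur_triple (s : List Int) (out : Bool) : Prop := out = has_schur_triple_alt s
instance (s : List Int) (out : Bool) : Decidable (Spec_has_schur_triple s out) := by unfold Spec_has_schur_triple; infer_instance

-- ===== CLAIM (what is proved, stated in full; the proofs are below) =====
def Claim_equal_has_schur_triple : Prop := ∀ (s : List Int), Dom_has_schur_triple s → Spec_has_schur_triple s (has_schur_triple s)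

-- ===== LEMMAS AND PROOFS =====

/-- A's triangular scan, written as structural recursion: test x against the whole
suffix (including x itself), then recurse. -/
def triScan (P : Int → Int → Bool) : List Int → Bool
  | [] => false
  | x :: xs => (x :: xs).any (P x) || triScan P xs

lemma triScan_iff (P : Int → Int → Bool) (hsym : ∀ a b, P a b = P b a) :
    ∀ l : List Int, triScan P l = true ↔ ∃ a ∈ l, ∃ b ∈ l, P a b = true := by
  intro l
  induction l with
  | nil => simp [triScan]
  | cons x xs ih =>
    simp only [triScan, Bool.or_eq_true, List.any_eq_true, ih]
    constructor
    · rintro (⟨b, hb, hP⟩ | ⟨a, ha, b, hb, hP⟩)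
      · exact ⟨x, by simp, b, hb, hP⟩
      · exact ⟨a, by simp [ha], b, by simp [hb], hP⟩
    · rintro ⟨a, ha, b, hb, hP⟩
      rcases List.mem_cons.mp ha with rfl | ha
      · exact Or.inl ⟨b, hb, hP⟩
      rcases List.mem_cons.mp hb with rfl | hb
      · exact Or.inl ⟨a, by simp [ha], by rw [hsym]; exact hP⟩
      · exact Or.inr ⟨a, ha, b, hb, hP⟩

/-- The enumerate + suffix-slice loop of port A equals `triScan`. -/
lemma enum_slice_eq_triScan (P : Int → Int → Bool) :
    ∀ (xs full : List Int) (n : ℕ),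
      (∀ k : ℕ, PySem.List.slice full (some ((n : Int) + k)) none = xs.drop k) →
      ((PySem.List.enumerate xs (n : Int)).any (fun p =>
        (PySem.List.slice full (some p.1) none).any (fun b => P p.2 b)))
        = triScan P xs := by
  intro xs
  induction xs with
  | nil => intro full n h; simp [PySem.List.enumerate_nil, triScan]
  | cons x xs ih =>
    intro full n h
    have h0 : PySem.List.slice full (some ((n : Int))) none = x :: xs := by
      have := h 0; simpa using this
    have hrec := ih full (n + 1) (by
      intro k
      have := h (1 + k)
      have hcast : ((n : Int)) + ((1 + k : ℕ) : Int) = (((n + 1 : ℕ)) : Int) + (k : Int) := by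
        push_cast; ring
      rw [hcast] at this
      simpa [Nat.add_comm 1 k] using this)
    rw [PySem.List.enumerate_cons]
    simp only [List.any_cons]
    rw [h0]
    have : ((n : Int) + 1) = (((n + 1 : ℕ)) : Int) := by push_cast; ring
    rw [this, hrec]
    simp [triScan]

lemma hasA_iff (s : List Int) :
    has_schur_triple s = true ↔ ∃ a ∈ s, ∃ b ∈ s, s.contains (a + b) = true := by
  unfold has_schur_triple
  have key := enum_slice_eq_triScan (fun a b => PySem.Set.contains s (a + b))
      (PySem.List.sorted s (fun x => x) false) (PySem.List.sorted s (fun x => x) false) 0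
      (by intro k; simp)
  rw [Nat.cast_zero] at key
  rw [key]
  rw [triScan_iff _ (by intro a b; simp [Int.add_comm])]
  constructor
  · rintro ⟨a, ha, b, hb, hP⟩
    exact ⟨a, (PySem.List.mem_sorted _ _ _ _).mp ha, b, (PySem.List.mem_sorted _ _ _ _).mp hb,
      by simp [PySem.Set.contains] at hP ⊢; exact hP⟩
  · rintro ⟨a, ha, b, hb, hP⟩
    exact ⟨a, (PySem.List.mem_sorted _ _ _ _).mpr ha, b, (PySem.List.mem_sorted _ _ _ _).mpr hb,
      by simp [PySem.Set.contains] at hP ⊢; exact hP⟩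

/-- Two-pointer correctness on a list whose `getD`-values are monotone in the index:
the loop returns true iff some in-window pair `i ≤ j` sums to the target. -/
lemma twoPtr_iff (xs : List Int)
    (hmono : ∀ i j : ℕ, i ≤ j → j < xs.length → xs.getD i 0 ≤ xs.getD j 0) (c : Int) :
    ∀ (n : ℕ) (lo hi : Int), (hi + 1 - lo).toNat = n → 0 ≤ lo → hi < (xs.length : Int) →
      (twoPtr xs c lo hi = true ↔
        ∃ i j : ℕ, lo ≤ (i : Int) ∧ i ≤ j ∧ (j : Int) ≤ hi ∧ xs.getD i 0 + xs.getD j 0 = c) := by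
  intro n
  induction n using Nat.strong_induction_on with
  | _ n ih =>
    intro lo hi hn hlo hhi
    by_cases hle : lo ≤ hi
    · have hloL : lo < (xs.length : Int) := lt_of_le_of_lt hle hhi
      have hgl : PySem.List.pyGetD xs lo 0 = xs.getD lo.toNat 0 := by
        rw [PySem.List.pyGetD_eq_getElem xs 0 hlo (by simpa using hloL)]
        exact (List.getD_eq_getElem xs 0 _).symm
      have hgh : PySem.List.pyGetD xs hi 0 = xs.getD hi.toNat 0 := by
        rw [PySem.List.pyGetD_eq_getElem xs 0 (le_trans hlo hle) (by simpa using hhi)]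
        exact (List.getD_eq_getElem xs 0 _).symm
      rw [twoPtr]
      simp only [hle, dif_pos, hgl, hgh]
      set tl := xs.getD lo.toNat 0 with htl
      set th := xs.getD hi.toNat 0 with hth
      by_cases heq : tl + th = c
      · simp only [heq, reduceIte]
        constructor
        · intro _
          exact ⟨lo.toNat, hi.toNat, by omega, by omega, by omega, heq⟩
        · intro _; trivial
      · rw [if_neg heq]
        by_cases hlt : tl + th < c
        · rw [if_pos hlt]
          rw [ih (hi + 1 - (lo + 1)).toNat (by omega) (lo + 1) hi (by omega) (by omega) hhi]
          constructor
          · rintro ⟨i, j, h1, h2, h3, h4⟩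
            exact ⟨i, j, by omega, h2, h3, h4⟩
          · rintro ⟨i, j, h1, h2, h3, h4⟩
            refine ⟨i, j, ?_, h2, h3, h4⟩
            by_contra hcon
            have hieq : (i : Int) = lo := by omega
            have hj : xs.getD j 0 ≤ th := by
              apply hmono j hi.toNat (by omega) (by omega)
            have hi' : xs.getD i 0 = tl := by
              rw [htl]; congr 1; omega
            omega
        · rw [if_neg hlt]
          rw [ih (hi - 1 + 1 - lo).toNat (by omega) lo (hi - 1) (by omega) hlo (by omega)]
          constructor
          · rintro ⟨i, j, h1, h2, h3, h4⟩
            exact ⟨i, j, h1, h2, by omega, h4⟩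
          · rintro ⟨i, j, h1, h2, h3, h4⟩
            refine ⟨i, j, h1, h2, ?_, h4⟩
            by_contra hcon
            have hjeq : (j : Int) = hi := by omega
            have hi' : tl ≤ xs.getD i 0 := by
              apply hmono lo.toNat i (by omega) (by omega)
            have hj' : xs.getD j 0 = th := by
              rw [hth]; congr 1; omega
            omega
    · rw [twoPtr]
      simp only [hle, dif_neg, not_false_iff]
      constructor
      · intro h; cases h
      · rintro ⟨i, j, h1, h2, h3, _⟩
        exfalso; omega

/-- In a `≤`-sorted list, any two members `a ≤ b` occur at indices `i ≤ j`. -/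
lemma exists_le_indices (l : List Int) (hl : l.Pairwise (· ≤ ·)) :
    ∀ a b : Int, a ∈ l → b ∈ l → a ≤ b →
      ∃ i j : ℕ, i ≤ j ∧ j < l.length ∧ l.getD i 0 = a ∧ l.getD j 0 = b := by
  induction l with
  | nil => intro a b ha _ _; cases ha
  | cons x t ih =>
    intro a b ha hb hab
    have hx : ∀ y ∈ t, x ≤ y := (List.pairwise_cons.mp hl).1
    have hpw : t.Pairwise (· ≤ ·) := (List.pairwise_cons.mp hl).2
    by_cases hat : a ∈ t
    · by_cases hbt : b ∈ t
      · obtain ⟨i, j, h1, h2, h3, h4⟩ := ih hpw a b hat hbt hab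
        exact ⟨i + 1, j + 1, by omega, by simp; omega,
          by simpa using h3, by simpa using h4⟩
      · have hbx : b = x := (List.mem_cons.mp hb).resolve_right hbt
        have : a = b := le_antisymm hab (hbx ▸ hx a hat)
        exact absurd (this ▸ hat) hbt
    · have hax : a = x := (List.mem_cons.mp ha).resolve_right hat
      obtain ⟨j, hj, hjb⟩ := List.mem_iff_getElem.mp hb
      exact ⟨0, j, Nat.zero_le _, hj, by simp [hax],
        by rw [List.getD_eq_getElem _ _ hj]; exact hjb⟩

lemma hasB_iff (s : List Int) :
    has_schur_triple_alt s = true ↔ ∃ a ∈ s, ∃ b ∈ s, s.contains (a + b) = true := by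
  unfold has_schur_triple_alt
  set xs := PySem.List.sorted s (fun x => x) false with hxs
  have hpw : xs.Pairwise (· ≤ ·) := by
    simpa using PySem.List.sorted_pairwise s (fun x => x)
  have hmono : ∀ i j : ℕ, i ≤ j → j < xs.length → xs.getD i 0 ≤ xs.getD j 0 := by
    intro i j hij hj
    rcases Nat.lt_or_ge i j with hlt | hge
    · rw [List.getD_eq_getElem _ _ (by omega), List.getD_eq_getElem _ _ hj]
      exact List.pairwise_iff_getElem.mp hpw i j (by omega) hj hlt
    · have : i = j := by omega
      subst this; exact le_refl _
  simp only [List.any_eq_true]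
  constructor
  · rintro ⟨c, hc, htp⟩
    obtain ⟨i, j, h1, h2, h3, h4⟩ :=
      (twoPtr_iff xs hmono c _ 0 ((xs.length : Int) - 1) rfl (by omega) (by omega)).mp htp
    have hj : j < xs.length := by omega
    have hi : i < xs.length := by omega
    refine ⟨xs.getD i 0, ?_, xs.getD j 0, ?_, ?_⟩
    · exact (PySem.List.mem_sorted _ _ _ _).mp (by rw [List.getD_eq_getElem _ _ hi]; exact List.getElem_mem hi)
    · exact (PySem.List.mem_sorted _ _ _ _).mp (by rw [List.getD_eq_getElem _ _ hj]; exact List.getElem_mem hj)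
    · rw [h4]
      have := (PySem.List.mem_sorted s (fun x => x) false c).mp hc
      simpa using this
  · rintro ⟨a, ha, b, hb, hP⟩
    have hc : a + b ∈ xs := (PySem.List.mem_sorted _ _ _ _).mpr (by simpa using hP)
    have ha' : a ∈ xs := (PySem.List.mem_sorted _ _ _ _).mpr ha
    have hb' : b ∈ xs := (PySem.List.mem_sorted _ _ _ _).mpr hb
    refine ⟨a + b, hc, ?_⟩
    rcases le_total a b with hab | hab
    · obtain ⟨i, j, h1, h2, h3, h4⟩ := exists_le_indices xs hpw a b ha' hb' hab
      exact (twoPtr_iff xs hmono (a + b) _ 0 ((xs.length : Int) - 1) rfl (by omega) (by omega)).mpr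
        ⟨i, j, by omega, h1, by omega, by rw [h3, h4]⟩
    · obtain ⟨i, j, h1, h2, h3, h4⟩ := exists_le_indices xs hpw b a hb' ha' hab
      exact (twoPtr_iff xs hmono (a + b) _ 0 ((xs.length : Int) - 1) rfl (by omega) (by omega)).mpr
        ⟨i, j, by omega, h1, by omega, by rw [h3, h4]; ring⟩

-- ===== VERDICT (by name: the statement is the Claim_ definition above) =====
theorem has_schur_triple_spec : Claim_equal_has_schur_triple := by
  intro s _
  unfold Spec_has_schur_triple
  exact Bool.eq_iff_iff.mpr ((hasA_iff s).trans (hasB_iff s).symm)
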